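-- pv_equiv track=rewrite | github.com/machengyu341102/quant_multifactor | world_state_feeds.py | _base_watch_tags
-- ===== SOURCE A (Python) =====
-- from typing import Any
--
-- def _normalize_terms(items: list[object]) -> list[str]:
--     result: list[str] = []
--     for item in items:
--         text = str(item or "").strip()
--         if text:
--             result.append(text)
--     return result
--
-- def _base_watch_tags(direction: dict[str, Any], watch_item: dict[str, Any]) -> list[str]:
--     tags = []
--     for key in ("official_watchpoints",):
--         values = watch_item.get(key, [])
--         if isinstance(values, list):
--             tags.extend(_normalize_terms(values))
--     tags.extend(_normalize_terms(direction.get("keywords", [])[:2] if isinstance(direction.get("keywords"), list) else []))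
--     deduped = list(dict.fromkeys(tag for tag in tags if tag))
--     return deduped[:4]
-- ===== SOURCE B (Python) =====
-- def _base_watch_tags(direction, watch_item):
--     # One fused pass: collect, normalize, dedup and truncate incrementally,
--     # stopping as soon as 4 tags are gathered.
--     sources = []
--     wp = watch_item.get("official_watchpoints", [])
--     if isinstance(wp, list):
--         sources.append(wp)
--     kw = direction.get("keywords")
--     if isinstance(kw, list):
--         sources.append(kw[:2])
--     result = []
--     seen = set()
--     for src in sources:
--         for item in src:
--             tag = str(item or "").strip()
--             if tag and tag not in seen:
--                 seen.add(tag)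
--                 result.append(tag)
--                 if len(result) == 4:
--                     return result
--     return result
-- ===== Notes on version B (the rewrite author's own statement) =====
-- stated objective: alternative
-- what changed: Replaces A's phased pipeline (collect all normalized tags, then dict.fromkeys dedup, then slice [:4]) with one fused incremental pass over the candidate sources that normalizes, dedups via a seen set and appends in place, returning early once 4 tags are collected so the full tag list is never built.
import Mathlib
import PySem

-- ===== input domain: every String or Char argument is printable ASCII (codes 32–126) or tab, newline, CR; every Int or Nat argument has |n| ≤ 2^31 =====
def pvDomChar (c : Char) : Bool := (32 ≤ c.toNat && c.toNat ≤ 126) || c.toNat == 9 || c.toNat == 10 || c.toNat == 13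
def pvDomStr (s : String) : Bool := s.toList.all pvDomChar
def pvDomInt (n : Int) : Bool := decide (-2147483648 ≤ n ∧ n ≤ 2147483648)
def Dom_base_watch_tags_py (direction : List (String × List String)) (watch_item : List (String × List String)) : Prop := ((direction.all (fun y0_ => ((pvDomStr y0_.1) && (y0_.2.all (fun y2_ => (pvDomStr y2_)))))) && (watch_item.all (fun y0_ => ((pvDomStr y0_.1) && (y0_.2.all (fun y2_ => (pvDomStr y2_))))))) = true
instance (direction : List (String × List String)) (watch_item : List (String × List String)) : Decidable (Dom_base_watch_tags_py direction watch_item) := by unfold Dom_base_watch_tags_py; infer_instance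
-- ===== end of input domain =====

-- B fuses A's collect / dedup-by-dict / slice-[:4] pipeline into one incremental pass with a
-- seen set and an early return at 4 tags (objective: alternative decomposition; return value only).

-- dict.get(k, dflt) on an association list: first match, else default
def pvGetD (d : List (String × List String)) (k : String) (dflt : List String) : List String :=
  match d.find? (fun p => p.1 == k) with
  | some p => p.2
  | none => dflt

-- dict.get(k) (no default): first match, else None
def pvGet? (d : List (String × List String)) (k : String) : Option (List String) :=
  match d.find? (fun p => p.1 == k) with
  | some p => some p.2
  | none => none

-- ===== PORT A =====
-- _normalize_terms: str(item or "") on a string is the string itself ("" stays ""), then .strip()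
def pvNormalizeTerms (items : List String) : List String :=
  items.foldl (fun result item =>
    let text := PySem.Str.strip (if item == "" then "" else item)
    if text ≠ "" then result ++ [text] else result) []

def base_watch_tags_py (direction : List (String × List String)) (watch_item : List (String × List String)) : List String :=
  -- for key in ("official_watchpoints",): values = watch_item.get(key, []); isinstance(values, list) is
  -- always true under the List (String × List String) typing, so the extend always runs
  let tags : List String := [] ++ pvNormalizeTerms (pvGetD watch_item "official_watchpoints" [])
  -- isinstance(direction.get("keywords"), list) is true iff the key is present under this typing;
  -- when absent, get("keywords", [])[:2] would be [] anyway, so the literal value is getD ... [:2]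
  let tags := tags ++ pvNormalizeTerms (PySem.List.slice (pvGetD direction "keywords" []) none (some 2))
  let deduped := PySem.List.dedup (tags.filter (fun tag => tag ≠ ""))   -- list(dict.fromkeys(...))
  PySem.List.slice deduped none (some 4)

-- ===== PORT B =====
-- inner 'for item in src' loop; first component 'some r' signals the early 'return r'
def pvAltInner : List String → PySem.Set String → List String → (Option (List String)) × PySem.Set String × List String
  | [], seen, result => (none, seen, result)
  | item :: rest, seen, result =>
    let tag := PySem.Str.strip (if item == "" then "" else item)
    if tag ≠ "" && !(PySem.Set.contains seen tag) then
      let seen' := PySem.Set.add seen tag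
      let result' := result ++ [tag]
      if result'.length == 4 then (some result', seen', result')
      else pvAltInner rest seen' result'
    else pvAltInner rest seen result

-- outer 'for src in sources' loop
def pvAltOuter : List (List String) → PySem.Set String → List String → List String
  | [], _, result => result
  | src :: rest, seen, result =>
    match pvAltInner src seen result with
    | (some r, _, _) => r
    | (none, seen', result') => pvAltOuter rest seen' result'

def base_watch_tags_py_alt (direction : List (String × List String)) (watch_item : List (String × List String)) : List String :=
  let wp := pvGetD watch_item "official_watchpoints" []
  let sources : List (List String) := [wp]      -- isinstance(wp, list) always true under the typing
  let sources := match pvGet? direction "keywords" with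
    | some kw => sources ++ [PySem.List.slice kw none (some 2)]
    | none => sources                            -- kw is None: not a list, source skipped
  pvAltOuter sources PySem.Set.empty []

-- ===== PRECONDITION & SPEC =====
def Spec_base_watch_tags_py (direction : List (String × List String)) (watch_item : List (String × List String)) (out : List String) : Prop := out = base_watch_tags_py_alt direction watch_item
instance (direction : List (String × List String)) (watch_item : List (String × List String)) (out : List String) : Decidable (Spec_base_watch_tags_py direction watch_item out) := by unfold Spec_base_watch_tags_py; infer_instance

-- ===== CLAIM (what is proved, stated in full; the proofs are below) =====
def Claim_equal_base_watch_tags_py : Prop := ∀ (direction : List (String × List String)) (watch_item : List (String × List String)), Dom_base_watch_tags_py direction watch_item → Spec_base_watch_tags_py direction watch_item (base_watch_tags_py direction watch_item)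

-- ===== LEMMAS AND PROOFS =====

-- pvD src acc: one "dedup-extend" step — fold Set.add over the normalized source
def pvD (src acc : List String) : List String :=
  (pvNormalizeTerms src).foldl PySem.Set.add acc

theorem norm_fold (xs : List String) (acc : List String) :
    xs.foldl (fun result item =>
      let text := PySem.Str.strip (if item == "" then "" else item)
      if text ≠ "" then result ++ [text] else result) acc
    = acc ++ pvNormalizeTerms xs := by
  induction xs generalizing acc with
  | nil => simp [pvNormalizeTerms]
  | cons x xs ih =>
    rw [List.foldl_cons]
    rw [ih]
    conv_rhs => rw [pvNormalizeTerms, List.foldl_cons, ih]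
    dsimp only
    split_ifs <;> simp

theorem norm_cons (x : String) (xs : List String) :
    pvNormalizeTerms (x :: xs)
      = (if PySem.Str.strip (if x == "" then "" else x) ≠ ""
           then [PySem.Str.strip (if x == "" then "" else x)] else [])
        ++ pvNormalizeTerms xs := by
  conv_lhs => rw [pvNormalizeTerms, List.foldl_cons, norm_fold]
  dsimp only
  split_ifs <;> simp

theorem filter_normalize (items : List String) :
    (pvNormalizeTerms items).filter (fun tag => tag ≠ "") = pvNormalizeTerms items := by
  induction items with
  | nil => rfl
  | cons x xs ih =>
    rw [norm_cons, List.filter_append, ih]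
    by_cases h : PySem.Str.strip (if x == "" then "" else x) = ""
    · simp
    · simp [h]

theorem pvD_nil (acc : List String) : pvD [] acc = acc := rfl

theorem pvD_cons (x : String) (src acc : List String) :
    pvD (x :: src) acc
      = pvD src (if PySem.Str.strip (if x == "" then "" else x) ≠ ""
                   then PySem.Set.add acc (PySem.Str.strip (if x == "" then "" else x)) else acc) := by
  unfold pvD
  rw [norm_cons, List.foldl_append]
  split_ifs <;> simp [PySem.Set.add]

theorem prefix_foldl_add (xs : List String) (acc : List String) :
    acc <+: xs.foldl PySem.Set.add acc := by
  induction xs generalizing acc with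
  | nil => exact List.prefix_refl _
  | cons x xs ih =>
    rw [List.foldl_cons]
    refine List.IsPrefix.trans ?_ (ih (PySem.Set.add acc x))
    unfold PySem.Set.add
    split
    · exact List.prefix_refl _
    · exact List.prefix_append _ _

theorem prefix_pvD (src acc : List String) : acc <+: pvD src acc :=
  prefix_foldl_add _ _

theorem take_of_prefix_len {l m : List String} (h : l <+: m) (hl : l.length = 4) :
    m.take 4 = l := by
  obtain ⟨t, rfl⟩ := h
  rw [List.take_append_of_le_length (le_of_eq hl.symm), ← hl, List.take_length]

theorem inner_spec (src : List String) (res : List String) (h : res.length ≤ 3) :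
    pvAltInner src res res
      = if (pvD src res).length ≤ 3 then (none, pvD src res, pvD src res)
        else (some ((pvD src res).take 4), (pvD src res).take 4, (pvD src res).take 4) := by
  induction src generalizing res with
  | nil => simp [pvAltInner, pvD_nil, h]
  | cons x src ih =>
    rw [pvAltInner, pvD_cons]
    dsimp only
    generalize PySem.Str.strip (if x == "" then "" else x) = t
    by_cases h1 : t = ""
    · have hd : decide (t ≠ "") = false := decide_eq_false (not_not_intro h1)
      have hif : (if t ≠ "" then PySem.Set.add res t else res) = res := if_neg (fun hn => hn h1)
      rw [hd, hif]
      simp only [Bool.false_and, Bool.false_eq_true, if_false]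
      exact ih res h
    · have hd : decide (t ≠ "") = true := decide_eq_true h1
      by_cases h2 : t ∈ res
      · have hct : PySem.Set.contains res t = true := by simp [PySem.Set.contains, h2]
        have hif : (if t ≠ "" then PySem.Set.add res t else res) = res := by
          rw [if_pos h1]
          simp [PySem.Set.add, PySem.Set.contains, h2]
        rw [hif, hct]
        simp only [Bool.not_true, Bool.and_false, Bool.false_eq_true, if_false]
        exact ih res h
      · have hcf : PySem.Set.contains res t = false := by simp [PySem.Set.contains, h2]
        have hadd : PySem.Set.add res t = res ++ [t] := by
          simp [PySem.Set.add, PySem.Set.contains, h2]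
        have hif : (if t ≠ "" then PySem.Set.add res t else res) = res ++ [t] := by
          rw [if_pos h1, hadd]
        rw [hif, hd, hcf, hadd]
        simp only [Bool.not_false, Bool.and_self, if_true]
        by_cases h4 : res.length = 3
        · have hb : ((res ++ [t]).length == 4) = true := by simp [h4]
          rw [if_pos hb]
          have hlen : (res ++ [t]).length = 4 := by simp [h4]
          have hpre := prefix_pvD src (res ++ [t])
          have hge : ¬ (pvD src (res ++ [t])).length ≤ 3 := by
            have := hpre.length_le
            omega
          rw [if_neg hge, take_of_prefix_len hpre hlen]
        · have hb : ((res ++ [t]).length == 4) = false := by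
            simp
            omega
          rw [hb]
          simp only [Bool.false_eq_true, if_false]
          have h' : (res ++ [t]).length ≤ 3 := by
            simp
            omega
          rw [ih _ h']

theorem prefix_foldl_pvD (rest : List (List String)) (acc : List String) :
    acc <+: rest.foldl (fun a s => pvD s a) acc := by
  induction rest generalizing acc with
  | nil => exact List.prefix_refl _
  | cons s rest ih =>
    exact List.IsPrefix.trans (prefix_pvD s acc) (ih (pvD s acc))

theorem outer_spec (srcs : List (List String)) (res : List String) (h : res.length ≤ 3) :
    pvAltOuter srcs res res = (srcs.foldl (fun acc src => pvD src acc) res).take 4 := by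
  induction srcs generalizing res with
  | nil =>
    have ht : res.take 4 = res := List.take_of_length_le (by omega)
    simp [pvAltOuter, ht]
  | cons src rest ih =>
    rw [pvAltOuter, inner_spec src res h, List.foldl_cons]
    by_cases hc : (pvD src res).length ≤ 3
    · simp only [hc, if_true]
      exact ih _ hc
    · simp only [hc, if_false]
      have hpre := prefix_foldl_pvD rest (pvD src res)
      obtain ⟨t, e⟩ := hpre
      rw [← e, List.take_append_of_le_length (by omega)]

theorem slice_to_two (xs : List String) : PySem.List.slice xs none (some 2) = xs.take 2 := by
  simpa using PySem.List.slice_to_natCast xs 2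

theorem slice_to_four (xs : List String) : PySem.List.slice xs none (some 4) = xs.take 4 := by
  simpa using PySem.List.slice_to_natCast xs 4

theorem getD_get?_some {d : List (String × List String)} {k : String} {v : List String}
    (h : pvGet? d k = some v) (dflt : List String) : pvGetD d k dflt = v := by
  unfold pvGet? at h
  unfold pvGetD
  cases hf : d.find? (fun p => p.1 == k) <;> simp [hf] at h ⊢ <;> simp [h]

theorem getD_get?_none {d : List (String × List String)} {k : String}
    (h : pvGet? d k = none) (dflt : List String) : pvGetD d k dflt = dflt := by
  unfold pvGet? at h
  unfold pvGetD
  cases hf : d.find? (fun p => p.1 == k) <;> simp [hf] at h ⊢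

-- ===== VERDICT (by name: the statement is the Claim_ definition above) =====
theorem base_watch_tags_py_spec : Claim_equal_base_watch_tags_py := by
  intro direction watch_item _
  unfold Spec_base_watch_tags_py base_watch_tags_py base_watch_tags_py_alt
  dsimp only
  simp only [List.nil_append]
  rw [slice_to_four]
  rw [List.filter_append, filter_normalize, filter_normalize]
  rw [PySem.List.dedup_eq_ofList, PySem.Set.ofList_eq_foldl, List.foldl_append]
  cases hk : pvGet? direction "keywords" with
  | some kw =>
    rw [getD_get?_some hk]
    dsimp only
    rw [show (PySem.Set.empty : PySem.Set String) = [] from rfl]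
    rw [outer_spec _ [] (by simp)]
    simp [pvD]
  | none =>
    rw [getD_get?_none hk]
    dsimp only
    rw [show (PySem.Set.empty : PySem.Set String) = [] from rfl]
    rw [outer_spec _ [] (by simp)]
    simp [pvD, slice_to_two, pvNormalizeTerms]
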